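-- pv_equiv track=rewrite | github.com/buildoak/fieldwork-skills | skills/video-gen/scripts/project_init.py | is_kebab_case
-- ===== SOURCE A (Python) =====
-- def is_kebab_case(value: str) -> bool:
--     if not value or value.startswith("-") or value.endswith("-"):
--         return False
--     allowed = set("abcdefghijklmnopqrstuvwxyz0123456789-")
--     if any(ch not in allowed for ch in value):
--         return False
--     if "--" in value:
--         return False
--     return True
-- ===== SOURCE B (Python) =====
-- def is_kebab_case(value: str) -> bool:
--     # single-pass DFA: the flag is True at the start and right after a dash
--     boundary = True
--     for ch in value:
--         if ch == '-':
--             if boundary: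
--                 return False
--             boundary = True
--         elif ch in "abcdefghijklmnopqrstuvwxyz0123456789":
--             boundary = False
--         else:
--             return False
--     return not boundary
-- ===== Notes on version B (the rewrite author's own statement) =====
-- stated objective: alternative
-- what changed: Replaced A's four separate checks (empty/startswith/endswith guards, a set-membership scan, and a '--' substring search) by one left-to-right DFA pass that tracks a single word-boundary flag and early-exits.
import Mathlib
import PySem

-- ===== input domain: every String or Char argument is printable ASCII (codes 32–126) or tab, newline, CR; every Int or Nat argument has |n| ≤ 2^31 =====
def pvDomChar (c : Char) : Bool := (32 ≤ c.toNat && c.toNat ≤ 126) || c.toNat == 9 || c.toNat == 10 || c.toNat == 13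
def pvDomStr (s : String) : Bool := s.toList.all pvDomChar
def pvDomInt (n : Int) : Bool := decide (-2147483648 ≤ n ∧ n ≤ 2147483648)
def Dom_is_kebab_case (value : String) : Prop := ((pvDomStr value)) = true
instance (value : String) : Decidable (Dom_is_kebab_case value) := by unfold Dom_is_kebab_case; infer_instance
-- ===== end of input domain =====

-- B replaces A's four separate checks (empty/edge-dash guards, a set scan, a "--" search)
-- by one single-pass DFA over the characters; objective: alternative (same O(n) cost).

-- ===== PORT A =====
def is_kebab_case (value : String) : Bool :=
  if value == "" || PySem.Str.startswith value "-" || PySem.Str.endswith value "-" then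
    false
  else
    let allowed : PySem.Set Char := PySem.Set.ofList "abcdefghijklmnopqrstuvwxyz0123456789-".toList
    if value.toList.any (fun ch => !(PySem.Set.contains allowed ch)) then
      false
    else if PySem.Str.isIn "--" value then
      false
    else
      true

-- ===== PORT B =====
-- the alphabet literal of Source B's `ch in "abcdefghijklmnopqrstuvwxyz0123456789"` test
def kebabAlnum : List Char := "abcdefghijklmnopqrstuvwxyz0123456789".toList

-- the loop of Source B: the boundary flag is true at the start and right after a dash
def kebabGo : List Char → Bool → Bool
  | [], boundary => !boundary
  | ch :: rest, boundary =>
    if ch = '-' then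
      if boundary then false else kebabGo rest true
    else if kebabAlnum.contains ch then
      kebabGo rest false
    else
      false

def is_kebab_case_alt (value : String) : Bool := kebabGo value.toList true

-- ===== PRECONDITION & SPEC =====
def Spec_is_kebab_case (value : String) (out : Bool) : Prop := out = is_kebab_case_alt value
instance (value : String) (out : Bool) : Decidable (Spec_is_kebab_case value out) := by unfold Spec_is_kebab_case; infer_instance

-- ===== CLAIM (what is proved, stated in full; the proofs are below) =====
def Claim_equal_is_kebab_case : Prop := ∀ (value : String), Dom_is_kebab_case value → Spec_is_kebab_case value (is_kebab_case value)

-- ===== LEMMAS AND PROOFS =====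

-- proof-side characterisations: allowed character, adjacent double dash, trailing dash
def okc (c : Char) : Bool := c == '-' || kebabAlnum.contains c

def hasDD : List Char → Bool
  | '-' :: '-' :: _ => true
  | _ :: rest => hasDD rest
  | [] => false

def endsDash : List Char → Bool
  | [] => false
  | [c] => c == '-'
  | _ :: rest => endsDash rest

def specF (l : List Char) : Bool := l.all okc && !hasDD l && !endsDash l

lemma hasDD_cons (c : Char) (l : List Char) :
    hasDD (c :: l) = ((c == '-' && l.head? == some '-') || hasDD l) := by
  cases l with
  | nil => simp [hasDD]
  | cons d t =>
    by_cases hc : c = '-' <;> by_cases hd : d = '-' <;>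
      simp_all [hasDD]

lemma endsDash_cons (c : Char) (l : List Char) :
    endsDash (c :: l) = (if l = [] then c == '-' else endsDash l) := by
  cases l <;> simp [endsDash]

-- the DFA invariant: both states characterised at once
lemma kebabGo_spec (l : List Char) :
    kebabGo l false = specF l ∧
    kebabGo l true = (!l.isEmpty && !(l.head? == some '-') && specF l) := by
  induction l with
  | nil => simp [kebabGo, specF, hasDD, endsDash]
  | cons c rest ih =>
    by_cases hc : c = '-'
    · subst hc
      constructor
      · show kebabGo rest true = _
        rw [ih.2]
        cases rest with
        | nil => simp [specF, endsDash]
        | cons d t =>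
          by_cases hd : d = '-'
          · subst hd; simp [specF, hasDD]
          · have hd' : (d == '-') = false := by simp [hd]
            simp [specF, hasDD_cons, endsDash_cons, okc, hd']
      · simp [kebabGo]
    · have hGoF : kebabGo (c :: rest) false
          = (if kebabAlnum.contains c then kebabGo rest false else false) := by
        simp [kebabGo, hc]
      have hGoT : kebabGo (c :: rest) true
          = (if kebabAlnum.contains c then kebabGo rest false else false) := by
        rw [kebabGo, if_neg hc]
      have hspec : specF (c :: rest) = (okc c && specF rest) := by
        simp only [specF, List.all_cons, hasDD_cons, endsDash_cons]
        cases hrest : rest with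
        | nil => simp [hc, endsDash, hasDD]
        | cons d t =>
          rw [if_neg (List.cons_ne_nil d t)]
          have : (c == '-') = false := by simp [hc]
          simp [this, Bool.and_assoc]
      have hok : okc c = kebabAlnum.contains c := by simp [okc, hc]
      constructor
      · rw [hGoF, hspec, ih.1, hok]
        cases kebabAlnum.contains c <;> simp
      · rw [hGoT, hspec, ih.1, hok]
        have hhd : (((c :: rest).head? == some '-') : Bool) = false := by simp [hc]
        rw [hhd]
        cases kebabAlnum.contains c <;> simp

-- A's membership set, spelled as Source B's alphabet plus the dash
lemma allowed_split : "abcdefghijklmnopqrstuvwxyz0123456789-".toList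
    = kebabAlnum ++ ['-'] := by
  rw [kebabAlnum]; decide

set_option maxRecDepth 2048 in
lemma contains_allowed (c : Char) :
    PySem.Set.contains (PySem.Set.ofList "abcdefghijklmnopqrstuvwxyz0123456789-".toList) c = okc c := by
  rw [Bool.eq_iff_iff, PySem.Set.contains_iff, PySem.Set.mem_ofList, allowed_split]
  simp only [List.mem_append, List.mem_singleton, okc, Bool.or_eq_true, beq_iff_eq,
    List.contains_iff_mem]
  tauto

lemma startswith_head (l : List Char) :
    PySem.Chars.startswith l ['-'] = (l.head? == some '-') := by
  rw [Bool.eq_iff_iff, PySem.Chars.startswith_iff]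
  cases l with
  | nil => simp
  | cons c t =>
    simp [List.cons_prefix_cons]
    exact eq_comm

set_option maxRecDepth 2048 in
lemma endswith_endsDash (l : List Char) :
    PySem.Chars.endswith l ['-'] = endsDash l := by
  rw [Bool.eq_iff_iff, PySem.Chars.endswith_iff]
  induction l with
  | nil =>
    simp only [endsDash, Bool.false_eq_true, iff_false]
    intro h; simpa using h.length_le
  | cons c t ih =>
    rw [List.suffix_cons_iff, endsDash_cons]
    cases t with
    | nil =>
      simp
      exact eq_comm
    | cons d u => simp [ih]

lemma isIn_hasDD (l : List Char) :
    PySem.Chars.isIn ['-', '-'] l = hasDD l := by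
  rw [Bool.eq_iff_iff, PySem.Chars.isIn_iff_infix]
  induction l with
  | nil =>
    simp only [hasDD, Bool.false_eq_true, iff_false]
    intro h; simpa using h.length_le
  | cons c t ih =>
    rw [List.infix_cons_iff, hasDD_cons, ih]
    cases t with
    | nil => simp [List.cons_prefix_cons, hasDD]
    | cons d u =>
      constructor
      · rintro (h | h)
        · rw [List.cons_prefix_cons, List.cons_prefix_cons] at h
          simp [← h.1, ← h.2.1]
        · simp [h]
      · intro h
        rcases Bool.or_eq_true_iff.mp h with h | h
        · left
          simp only [Bool.and_eq_true, beq_iff_eq, List.head?_cons, Option.some.injEq] at h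
          rw [List.cons_prefix_cons, List.cons_prefix_cons]
          exact ⟨h.1.symm, h.2.symm, by simp⟩
        · right; exact h

-- ===== VERDICT (by name: the statement is the Claim_ definition above) =====
theorem is_kebab_case_spec : Claim_equal_is_kebab_case := by
  intro value _
  show is_kebab_case value = is_kebab_case_alt value
  unfold is_kebab_case is_kebab_case_alt
  rw [(kebabGo_spec value.toList).2]
  have hdash : ("-" : String).toList = ['-'] := by decide
  have hdd : ("--" : String).toList = ['-', '-'] := by decide
  have hempty : (value == "") = value.toList.isEmpty := by
    rw [Bool.eq_iff_iff, beq_iff_eq, ← String.toList_eq_nil_iff, ← List.isEmpty_iff]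
  simp only [PySem.Str.startswith_eq, PySem.Str.endswith_eq, PySem.Str.isIn_eq, hdash, hdd]
  rw [hempty, startswith_head, endswith_endsDash, isIn_hasDD]
  simp only [contains_allowed, specF]
  have hall : (value.toList.any fun ch => !okc ch) = !value.toList.all okc := by
    simp [List.all_eq_not_any_not]
  rw [hall]
  cases he : value.toList.isEmpty <;>
    cases hh : (value.toList.head? == some '-') <;>
      cases hd : endsDash value.toList <;>
        cases ha : value.toList.all okc <;>
          cases hD : hasDD value.toList <;>
            simp
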